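-- pv_equiv track=rewrite | github.com/R-kill-9/C-FIB | Practica2/aesMarcel.Sanchez_Ricard.Medina.py | bytes2matrix
-- ===== SOURCE A (Python) =====
-- def bytes2matrix(text):
--     matrix = []
--     for i in range(0, len(text), 4):
--         row = []
--         for j in range(4):
--             if i + j < len(text):
--                 row.append(text[i + j])
--             else:
--                 row.append(0)
--         matrix.append(row)
--     return matrix
-- ===== SOURCE B (Python) =====
-- def bytes2matrix(text):
--     pad = (-len(text)) % 4
--     flat = list(text) + [0] * pad
--     return [flat[i:i + 4] for i in range(0, len(flat), 4)]
-- ===== Notes on version B (the rewrite author's own statement) =====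
-- stated objective: simpler
-- what changed: Replaces the per-element bounds-check inside nested loops by computing the padding count once with (-len)%4, padding the list globally, and slicing it into uniform 4-element chunks.
import Mathlib
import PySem

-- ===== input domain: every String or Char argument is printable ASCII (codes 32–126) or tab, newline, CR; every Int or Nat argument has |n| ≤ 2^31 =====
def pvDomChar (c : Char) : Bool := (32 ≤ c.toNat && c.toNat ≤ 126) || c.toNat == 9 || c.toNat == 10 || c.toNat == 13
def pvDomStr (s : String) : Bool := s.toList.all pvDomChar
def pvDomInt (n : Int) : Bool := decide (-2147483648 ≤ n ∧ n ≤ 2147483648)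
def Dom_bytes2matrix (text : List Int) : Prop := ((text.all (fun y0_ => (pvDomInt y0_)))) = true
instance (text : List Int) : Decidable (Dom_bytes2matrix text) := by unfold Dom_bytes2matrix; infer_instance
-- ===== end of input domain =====

-- B computes the padding count once with (-len)%4, pads globally, and slices into uniform
-- 4-element chunks, replacing A's per-element bounds check inside nested loops (simpler).


-- ===== PORT A =====
def bytes2matrix (text : List Int) : List (List Int) :=
  (PySem.List.pyRange 0 (text.length : Int) 4).foldl
    (fun matrix i =>
      matrix ++ [(PySem.List.pyRange 0 4 1).foldl
        (fun row j =>
          row ++ [if i + j < (text.length : Int) then PySem.List.pyGetD text (i + j) 0 else 0])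
        []])
    []

-- ===== PORT B =====
def bytes2matrix_alt (text : List Int) : List (List Int) :=
  let pad : Int := PySem.Int.mod (-(text.length : Int)) 4
  let flat : List Int := text ++ List.replicate pad.toNat 0
  (PySem.List.pyRange 0 (flat.length : Int) 4).map
    (fun i => PySem.List.slice flat (some i) (some (i + 4)))

-- ===== PRECONDITION & SPEC =====
def Spec_bytes2matrix (text : List Int) (out : List (List Int)) : Prop := out = bytes2matrix_alt text
instance (text : List Int) (out : List (List Int)) : Decidable (Spec_bytes2matrix text out) := by unfold Spec_bytes2matrix; infer_instance

-- ===== CLAIM (what is proved, stated in full; the proofs are below) =====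
def Claim_equal_bytes2matrix : Prop := ∀ (text : List Int), Dom_bytes2matrix text → Spec_bytes2matrix text (bytes2matrix text)

-- ===== LEMMAS AND PROOFS =====

-- one padded-list element: the guarded read of A equals the plain read of B's padded list
lemma pv_comp (text : List Int) (padN p : Nat) (hp : p < text.length + padN) :
    (if (p : Int) < (text.length : Int) then PySem.List.pyGetD text (p : Int) 0 else 0)
      = (text ++ List.replicate padN 0).getD p 0 := by
  by_cases h : p < text.length
  · rw [if_pos (by exact_mod_cast h), PySem.List.pyGetD_natCast,
      List.getD_append _ _ _ _ h]
  · rw [if_neg (by exact_mod_cast h)]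
    rw [List.getD_eq_getElem?_getD, List.getElem?_append_right (by omega),
      List.getElem?_replicate]
    have hlt : p - text.length < padN := by omega
    simp [hlt]

-- take 4 after drop p, written with getD, when p+4 elements exist
lemma pv_take4_drop (l : List Int) (p : Nat) (h : p + 4 ≤ l.length) :
    (l.drop p).take 4 = [l.getD p 0, l.getD (p+1) 0, l.getD (p+2) 0, l.getD (p+3) 0] := by
  have hlen : (l.drop p).length = l.length - p := List.length_drop ..
  have h4 : 4 ≤ (l.drop p).length := by omega
  match hd : l.drop p with
  | [] => simp [hd] at h4
  | [a] => simp [hd] at h4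
  | [a, b] => simp [hd] at h4
  | [a, b, c] => simp [hd] at h4
  | a :: b :: c :: d :: rest =>
    have g : ∀ j : Nat, j < 4 → (l.drop p).getD j 0 = l.getD (p + j) 0 := by
      intro j hj
      rw [List.getD_eq_getElem?_getD, List.getD_eq_getElem?_getD, List.getElem?_drop]
    have g0 : l.getD p 0 = a := by
      have := g 0 (by omega); rw [hd] at this; simpa [List.getD] using this.symm
    have g1 : l.getD (p+1) 0 = b := by
      have := g 1 (by omega); rw [hd] at this; simpa [List.getD] using this.symm
    have g2 : l.getD (p+2) 0 = c := by
      have := g 2 (by omega); rw [hd] at this; simpa [List.getD] using this.symm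
    have g3 : l.getD (p+3) 0 = d := by
      have := g 3 (by omega); rw [hd] at this; simpa [List.getD] using this.symm
    rw [g0, g1, g2, g3]
    rfl

theorem bytes2matrix_spec : Claim_equal_bytes2matrix := by
  intro text _
  unfold Spec_bytes2matrix bytes2matrix
  dsimp only [bytes2matrix_alt]
  set n := text.length with hn
  have hpad : PySem.Int.mod (-(n : Int)) 4 = (-(n : Int)) % 4 :=
    PySem.Int.mod_eq_emod_of_pos (by omega)
  rw [hpad]
  set padN : Nat := ((-(n : Int)) % 4).toNat with hpadN
  set flat : List Int := text ++ List.replicate padN 0 with hflat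
  have hflatlen : flat.length = n + padN := by simp [hflat, hn]
  set C : Nat := (n + 3) / 4 with hC
  have hm : n + padN = 4 * C := by omega
  rw [hflatlen]
  rw [PySem.List.pyRange_of_pos 0 (n : Int) (by norm_num),
      PySem.List.pyRange_of_pos 0 ((n + padN : Nat) : Int) (by norm_num)]
  have hcntA : (if (0:Int) < (n : Int) then (((n : Int) - 0 + 4 - 1) / 4).toNat else 0) = C := by
    split <;> omega
  have hcntB : (if (0:Int) < ((n + padN : Nat) : Int)
      then ((((n + padN : Nat) : Int) - 0 + 4 - 1) / 4).toNat else 0) = C := by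
    split <;> omega
  rw [hcntA, hcntB, List.foldl_map,
      PySem.List.foldl_append_singleton_eq_map, List.nil_append, List.map_map]
  refine List.map_congr_left ?_
  intro k hk
  have hk' : k < C := List.mem_range.mp hk
  simp only [Function.comp_apply, zero_add]
  have hfour : PySem.List.pyRange 0 4 1 = [0, 1, 2, 3] := by decide
  rw [hfour]
  simp only [List.foldl_cons, List.foldl_nil, List.nil_append, List.singleton_append,
    add_zero]
  rw [PySem.List.slice_toNat flat (by positivity) (by positivity)]
  have ht : ((4 * (k : Int) + 4).toNat - (4 * (k : Int)).toNat) = 4 := by omega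
  have hidx : (4 * (k : Int)).toNat = 4 * k := by omega
  rw [ht, hidx, pv_take4_drop flat (4 * k) (by omega)]
  have e0 : (4 * (k : Int)) = ((4 * k : Nat) : Int) := by push_cast; ring
  rw [e0]
  have e1 : ((4 * k : Nat) : Int) + 1 = ((4 * k + 1 : Nat) : Int) := by push_cast; ring
  have e2 : ((4 * k : Nat) : Int) + 2 = ((4 * k + 2 : Nat) : Int) := by push_cast; ring
  have e3 : ((4 * k : Nat) : Int) + 3 = ((4 * k + 3 : Nat) : Int) := by push_cast; ring
  rw [e1, e2, e3,
    pv_comp text padN (4 * k) (by omega), pv_comp text padN (4 * k + 1) (by omega),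
    pv_comp text padN (4 * k + 2) (by omega), pv_comp text padN (4 * k + 3) (by omega),
    hflat]
  rfl
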